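-- pv_equiv track=rewrite | github.com/DevByMatheo/Fundamentals | Python/Graphe/graphe1.py | sommet_plus_au_degre
-- ===== SOURCE A (Python) =====
-- def degre(a, sommet):
--     return len(a[sommet])
--
-- def sommet_plus_au_degre(a):
--     valeur_max = 0
--     for k in a.keys():
--         deg = degre(a, k)
--         if deg > valeur_max:
--             valeur_max = deg
--     L= []
--     for k in a.keys():
--         if degre(a, k) == valeur_max:
--             L.append(k)
--
--
--     return L
-- ===== SOURCE B (Python) =====
-- def sommet_plus_au_degre(a):
--     valeur_max = 0
--     L = []
--     for k, voisins in a.items():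
--         deg = len(voisins)
--         if deg > valeur_max:
--             valeur_max = deg
--             L = [k]
--         elif deg == valeur_max:
--             L.append(k)
--     return L
-- ===== Notes on version B (the rewrite author's own statement) =====
-- stated objective: alternative
-- what changed: Fuses A's two passes (one computing the maximum degree, one re-scanning to collect the keys attaining it) into a single pass that maintains the running maximum together with the current list of best vertices.
import Mathlib
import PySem

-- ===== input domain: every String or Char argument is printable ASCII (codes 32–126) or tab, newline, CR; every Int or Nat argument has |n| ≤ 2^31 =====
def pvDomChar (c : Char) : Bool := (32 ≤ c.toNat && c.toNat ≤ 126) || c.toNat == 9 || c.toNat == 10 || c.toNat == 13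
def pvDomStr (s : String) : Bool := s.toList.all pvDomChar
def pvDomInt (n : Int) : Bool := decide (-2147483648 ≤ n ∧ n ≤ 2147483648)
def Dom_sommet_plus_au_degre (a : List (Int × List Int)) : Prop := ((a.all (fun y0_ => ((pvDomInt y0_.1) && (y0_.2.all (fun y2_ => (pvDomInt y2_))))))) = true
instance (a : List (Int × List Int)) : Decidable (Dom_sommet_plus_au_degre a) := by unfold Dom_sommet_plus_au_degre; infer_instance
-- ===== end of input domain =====

-- B fuses A's two dict traversals (max degree, then collect) into one pass maintaining the running maximum and the current best-vertex list.


-- ===== PORT A =====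
-- The dict parameter is the association list of the dict's items (unique keys, insertion
-- order); 'for k in a.keys()' + 'a[k]' is ported as a fold over those pairs, where a[k]
-- is exactly the value paired with k. degre(a, k) is inlined as len of that value.
def sommet_plus_au_degre (a : List (Int × List Int)) : List Int :=
  let valeur_max : Int :=
    a.foldl (fun m kv => if (kv.2.length : Int) > m then (kv.2.length : Int) else m) 0
  a.foldl (fun L kv => if (kv.2.length : Int) = valeur_max then L ++ [kv.1] else L) []

-- ===== PORT B =====
-- single pass: state = (valeur_max, L)
def sommet_plus_au_degre_alt (a : List (Int × List Int)) : List Int :=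
  (a.foldl
    (fun s kv =>
      let deg : Int := kv.2.length
      if deg > s.1 then (deg, [kv.1])
      else if deg = s.1 then (s.1, s.2 ++ [kv.1])
      else s)
    ((0 : Int), ([] : List Int))).2

-- ===== PRECONDITION & SPEC =====
def Spec_sommet_plus_au_degre (a : List (Int × List Int)) (out : List Int) : Prop := out = sommet_plus_au_degre_alt a
instance (a : List (Int × List Int)) (out : List Int) : Decidable (Spec_sommet_plus_au_degre a out) := by unfold Spec_sommet_plus_au_degre; infer_instance

-- ===== CLAIM (what is proved, stated in full; the proofs are below) =====
def Claim_equal_sommet_plus_au_degre : Prop := ∀ (a : List (Int × List Int)), Dom_sommet_plus_au_degre a → Spec_sommet_plus_au_degre a (sommet_plus_au_degre a)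

-- ===== LEMMAS AND PROOFS =====

-- A's first loop (running maximum), as a function of an arbitrary start value
def pvMax (l : List (Int × List Int)) (m : Int) : Int :=
  l.foldl (fun m kv => if (kv.2.length : Int) > m then (kv.2.length : Int) else m) m

lemma pvMax_ge : ∀ (l : List (Int × List Int)) (m : Int), m ≤ pvMax l m := by
  intro l
  induction l with
  | nil => intro m; simp [pvMax]
  | cons kv l ih =>
    intro m
    simp only [pvMax, List.foldl_cons]
    split_ifs with h
    · exact le_trans (le_of_lt h) (ih _)
    · exact ih m

-- A's second loop appends exactly the keys whose degree equals M
lemma filt_eq : ∀ (l : List (Int × List Int)) (M : Int) (L : List Int),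
    l.foldl (fun L kv => if (kv.2.length : Int) = M then L ++ [kv.1] else L) L
      = L ++ (l.filter (fun kv => decide ((kv.2.length : Int) = M))).map (·.1) := by
  intro l
  induction l with
  | nil => intro M L; simp
  | cons kv l ih =>
    intro M L
    simp only [List.foldl_cons, List.filter_cons]
    by_cases h : (kv.2.length : Int) = M
    · simp [h, ih]
    · simp [h, ih]

-- invariant of B's single pass
lemma bfold_eq : ∀ (l : List (Int × List Int)) (m : Int) (L : List Int),
    l.foldl
      (fun s kv =>
        let deg : Int := kv.2.length
        if deg > s.1 then (deg, [kv.1])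
        else if deg = s.1 then (s.1, s.2 ++ [kv.1])
        else s)
      (m, L)
    = (pvMax l m,
        (if pvMax l m = m then L else [])
          ++ (l.filter (fun kv => decide ((kv.2.length : Int) = pvMax l m))).map (·.1)) := by
  intro l
  induction l with
  | nil => intro m L; simp [pvMax]
  | cons kv l ih =>
    intro m L
    have hmax : pvMax (kv :: l) m
        = pvMax l (if (kv.2.length : Int) > m then (kv.2.length : Int) else m) := by
      simp [pvMax]
    simp only [List.foldl_cons, List.filter_cons]
    by_cases h1 : (kv.2.length : Int) > m
    · rw [show (if (kv.2.length : Int) > m then ((kv.2.length : Int), [kv.1])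
            else if (kv.2.length : Int) = m then (m, L ++ [kv.1]) else (m, L))
            = ((kv.2.length : Int), [kv.1]) by simp [h1]]
      rw [ih]
      have hM : pvMax (kv :: l) m = pvMax l (kv.2.length : Int) := by
        rw [hmax, if_pos h1]
      have hge : (kv.2.length : Int) ≤ pvMax l (kv.2.length : Int) := pvMax_ge _ _
      have hne : ¬ pvMax (kv :: l) m = m := by
        rw [hM]; intro hc; omega
      rw [hM] at *
      rw [if_neg hne]
      by_cases h2 : (kv.2.length : Int) = pvMax l (kv.2.length : Int)
      · simp [← h2]
      · have : ¬ pvMax l (kv.2.length : Int) = (kv.2.length : Int) := fun hc => h2 hc.symm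
        simp [this, h2]
    · rw [show (if (kv.2.length : Int) > m then ((kv.2.length : Int), [kv.1])
            else if (kv.2.length : Int) = m then (m, L ++ [kv.1]) else (m, L))
            = (if (kv.2.length : Int) = m then (m, L ++ [kv.1]) else (m, L)) by simp [h1]]
      have hM : pvMax (kv :: l) m = pvMax l m := by rw [hmax, if_neg h1]
      rw [hM]
      by_cases h2 : (kv.2.length : Int) = m
      · rw [if_pos h2, ih]
        by_cases h3 : pvMax l m = m
        · have : (kv.2.length : Int) = pvMax l m := by omega
          simp [h3, this]
        · have : ¬ (kv.2.length : Int) = pvMax l m := by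
            have := pvMax_ge l m; omega
          simp [h3, this]
      · rw [if_neg h2, ih]
        have : ¬ (kv.2.length : Int) = pvMax l m := by
          have := pvMax_ge l m; omega
        simp [this]

-- ===== VERDICT (by name: the statement is the Claim_ definition above) =====
theorem sommet_plus_au_degre_spec : Claim_equal_sommet_plus_au_degre := by
  intro a _
  show sommet_plus_au_degre a = sommet_plus_au_degre_alt a
  unfold sommet_plus_au_degre sommet_plus_au_degre_alt
  rw [bfold_eq]
  simp only
  rw [filt_eq]
  show [] ++ _ = (if pvMax a 0 = 0 then ([] : List Int) else []) ++ _
  rw [show (if pvMax a 0 = 0 then ([] : List Int) else []) = [] by split_ifs <;> rfl]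
  rfl
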